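-- pv_equiv track=rewrite | github.com/PonteIneptique/paramhtrs-extension | app/aligner.py | common_hapaxes_normalized
-- ===== SOURCE A (Python) =====
-- from collections import Counter
--
-- def normalize(token: str) -> str:
--     return token.lower().replace("v", "u").replace("j", "i")
--
-- def common_hapaxes_normalized(raw: list[str], reg: list[str], max_distance: int) -> list[tuple[str, int, int]]:
--     raw_norm = [normalize(t) for t in raw]
--     reg_norm = [normalize(t) for t in reg]
--
--     raw_counts = Counter(raw_norm)
--     reg_counts = Counter(reg_norm)
--
--     return sorted([
--         (tok, raw_norm.index(tok), reg_norm.index(tok))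
--         for tok, c in raw_counts.items()
--         if c == 1 and reg_counts.get(tok) == 1 and raw_norm.index(tok) - reg_norm.index(tok) <= max_distance
--     ], key=lambda x: x[1])
-- ===== SOURCE B (Python) =====
-- from collections import Counter
--
-- def normalize(token: str) -> str:
--     return token.lower().replace("v", "u").replace("j", "i")
--
-- def common_hapaxes_normalized(raw: list[str], reg: list[str], max_distance: int) -> list[tuple[str, int, int]]:
--     raw_norm = [normalize(t) for t in raw]
--     reg_norm = [normalize(t) for t in reg]
--
--     raw_counts = Counter(raw_norm)
--     reg_counts = Counter(reg_norm)
--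
--     reg_first = {}
--     for j, t in enumerate(reg_norm):
--         if t not in reg_first:
--             reg_first[t] = j
--
--     out = []
--     for i, t in enumerate(raw_norm):
--         if raw_counts[t] == 1 and reg_counts.get(t) == 1 and i - reg_first[t] <= max_distance:
--             out.append((t, i, reg_first[t]))
--     return out
-- ===== Notes on version B (the rewrite author's own statement) =====
-- stated objective: faster
-- what changed: Replaces the dict-items comprehension with its per-token raw_norm.index/reg_norm.index scans and a final sorted() by one precomputed first-index dict for reg plus a single enumerate pass over raw_norm that emits rows already in raw-index order, so the sort and all repeated .index scans disappear.
import Mathlib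
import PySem

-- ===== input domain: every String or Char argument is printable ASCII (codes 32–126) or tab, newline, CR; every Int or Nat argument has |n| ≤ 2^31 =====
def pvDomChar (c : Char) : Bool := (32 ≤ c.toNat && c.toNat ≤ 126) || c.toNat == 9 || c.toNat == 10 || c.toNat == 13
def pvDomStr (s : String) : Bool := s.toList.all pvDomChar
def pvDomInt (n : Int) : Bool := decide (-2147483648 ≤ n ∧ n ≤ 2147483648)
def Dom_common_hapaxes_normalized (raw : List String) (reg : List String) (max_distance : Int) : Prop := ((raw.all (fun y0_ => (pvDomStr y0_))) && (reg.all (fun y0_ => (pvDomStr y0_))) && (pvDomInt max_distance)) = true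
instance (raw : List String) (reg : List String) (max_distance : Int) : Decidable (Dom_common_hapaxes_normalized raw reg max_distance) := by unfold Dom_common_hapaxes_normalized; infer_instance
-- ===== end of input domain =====

-- B drops A's sorted() and per-token .index() scans: one Counter pass plus a single
-- index-ordered scan over enumerate(raw_norm) emits the rows already sorted by raw index.

-- ===== PORT A =====
-- helper 'normalize' from the module (shared verbatim by both Python versions)
def pvNormalize (t : String) : String :=
  PySem.Str.replace (PySem.Str.replace (PySem.Str.lower t) "v" "u") "j" "i"

def common_hapaxes_normalized (raw : List String) (reg : List String) (max_distance : Int) : List (String × Int × Int) :=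
  let raw_norm := raw.map pvNormalize
  let reg_norm := reg.map pvNormalize
  let raw_counts := PySem.Dict.counter raw_norm
  let reg_counts := PySem.Dict.counter reg_norm
  PySem.List.sorted
    (raw_counts.items.filterMap (fun p =>
      if p.2 == (1 : Int) && reg_counts.get? p.1 == some (1 : Int) &&
          decide ((((PySem.List.index? raw_norm p.1).getD 0 : Nat) : Int)
            - (((PySem.List.index? reg_norm p.1).getD 0 : Nat) : Int) ≤ max_distance)
      then some (p.1, (((PySem.List.index? raw_norm p.1).getD 0 : Nat) : Int),
                 (((PySem.List.index? reg_norm p.1).getD 0 : Nat) : Int))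
      else none))
    (fun x => x.2.1) false

-- ===== PORT B =====
-- 'reg_first[t] = first index of t in reg_norm' built by one enumerate loop
def pvRegFirst (reg_norm : List String) : PySem.Dict String Int :=
  (PySem.List.enumerate reg_norm).foldl
    (fun d p => if d.contains p.2 then d else d.insert p.2 p.1) PySem.Dict.empty

def common_hapaxes_normalized_alt (raw : List String) (reg : List String) (max_distance : Int) : List (String × Int × Int) :=
  let raw_norm := raw.map pvNormalize
  let reg_norm := reg.map pvNormalize
  let raw_counts := PySem.Dict.counter raw_norm
  let reg_counts := PySem.Dict.counter reg_norm
  let reg_first := pvRegFirst reg_norm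
  (PySem.List.enumerate raw_norm).foldl
    (fun out p =>
      if raw_counts.getD p.2 0 == (1 : Int) && reg_counts.get? p.2 == some (1 : Int) &&
          decide (p.1 - reg_first.getD p.2 0 ≤ max_distance)
      then out ++ [(p.2, p.1, reg_first.getD p.2 0)]
      else out) []

-- ===== PRECONDITION & SPEC =====
def Spec_common_hapaxes_normalized (raw : List String) (reg : List String) (max_distance : Int) (out : List (String × Int × Int)) : Prop := out = common_hapaxes_normalized_alt raw reg max_distance
instance (raw : List String) (reg : List String) (max_distance : Int) (out : List (String × Int × Int)) : Decidable (Spec_common_hapaxes_normalized raw reg max_distance out) := by unfold Spec_common_hapaxes_normalized; infer_instance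

-- ===== CLAIM (what is proved, stated in full; the proofs are below) =====
def Claim_equal_common_hapaxes_normalized : Prop := ∀ (raw : List String) (reg : List String) (max_distance : Int), Dom_common_hapaxes_normalized raw reg max_distance → Spec_common_hapaxes_normalized raw reg max_distance (common_hapaxes_normalized raw reg max_distance)

-- ===== LEMMAS AND PROOFS =====

-- first-occurrence dict: lookup in the fold over enumerate is index? (shifted by the start)

theorem pvRegFirst_get? (ys : List String) (t : String) (s : Int) (d : PySem.Dict String Int) :
    ((PySem.List.enumerate ys s).foldl
      (fun d p => if d.contains p.2 then d else d.insert p.2 p.1) d).get? t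
    = if d.contains t then d.get? t
      else (PySem.List.index? ys t).map (fun k => s + (k : Int)) := by
  induction ys generalizing s d with
  | nil =>
    simp [PySem.List.enumerate_nil]
    intro h
    rw [PySem.Dict.contains_eq_isSome_get?] at h
    exact Option.eq_none_iff_forall_ne_some.mpr (fun v hv => by simp [hv] at h)
  | cons x ys ih =>
    rw [PySem.List.enumerate_cons, List.foldl_cons, ih]
    by_cases hx : x = t
    · subst hx
      by_cases hc : d.contains x
      · simp [hc]
      · simp only [hc, if_false, Bool.false_eq_true]
        have hct : (d.insert x s).contains x = true := PySem.Dict.contains_insert_self d x s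
        rw [if_pos hct, PySem.Dict.get?_insert_self, PySem.List.index?_cons_self]
        simp
    · have hne : (x == t) = false := by simp [hx]
      rw [PySem.List.index?_cons_of_ne ys hx]
      by_cases hc : d.contains x
      · simp only [hc, if_true]
        by_cases hdt : d.contains t
        · simp [hdt]
        · simp only [hdt, if_false, Bool.false_eq_true]
          cases PySem.List.index? ys t <;> simp <;> ring
      · simp only [hc, if_false, Bool.false_eq_true]
        have hct : (d.insert x s).contains t = ((t == x) || d.contains t) := PySem.Dict.contains_insert d x t s
        by_cases hdt : d.contains t
        · rw [if_pos (by simp [hct, hdt]), if_pos hdt, PySem.Dict.get?_insert_of_ne d s (Ne.symm hx)]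
        · rw [if_neg (by simp [hct, hdt, Ne.symm hx]), if_neg (by simp [hdt])]
          cases PySem.List.index? ys t <;> simp <;> ring

-- a hapax's only position is its index; Counter lookup = some 1 means hapax

theorem pvIndex?_of_count_one (xs : List String) (t : String) (i : Nat)
    (hc : xs.count t = 1) (hi : i < xs.length) (ht : xs[i] = t) :
    PySem.List.index? xs t = some i := by
  induction xs generalizing i with
  | nil => simp at hi
  | cons x xs ih =>
    by_cases hx : x = t
    · subst hx
      rw [List.count_cons_self] at hc
      have h0 : xs.count x = 0 := by omega
      have hnot : x ∉ xs := by simpa using List.count_eq_zero.mp h0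
      rw [PySem.List.index?_cons_self]
      cases i with
      | zero => rfl
      | succ j =>
        exfalso
        have hj : j < xs.length := by simpa using hi
        have : xs[j] = x := by simpa using ht
        exact hnot (this ▸ List.getElem_mem _)
    · rw [List.count_cons_of_ne hx] at hc
      rw [PySem.List.index?_cons_of_ne xs hx]
      cases i with
      | zero => exact absurd (by simpa using ht) hx
      | succ j =>
        have h2 := ih j hc (by simpa using hi) (by simpa using ht)
        rw [h2]
        rfl

theorem pvCounterGet?_one_iff (ys : List String) (t : String) :
    ((PySem.Dict.counter ys).get? t = some (1 : Int)) ↔ ys.count t = 1 := by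
  constructor
  · intro h
    have hd : (PySem.Dict.counter ys).getD t 0 = (1 : Int) := by
      rw [PySem.Dict.getD_eq_get?_getD, h]; rfl
    rw [PySem.Dict.getD_counter] at hd
    exact_mod_cast hd
  · intro h
    have hmem : t ∈ ys := List.count_pos_iff.mp (by omega)
    have hcont : (PySem.Dict.counter ys).contains t = true := by
      rw [PySem.Dict.contains_counter]; simpa using hmem
    rw [PySem.Dict.contains_eq_isSome_get?] at hcont
    obtain ⟨c, hcv⟩ := Option.isSome_iff_exists.mp hcont
    have hd : (PySem.Dict.counter ys).getD t 0 = c := by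
      rw [PySem.Dict.getD_eq_get?_getD, hcv]; rfl
    rw [PySem.Dict.getD_counter, h] at hd
    have : c = (1 : Int) := by exact_mod_cast hd.symm
    rw [hcv, this]

-- the common shape of both result lists
def pvRow (xs ys : List String) (m : Int) (z : String × Int × Int) : Prop :=
  ∃ (t : String) (k j : Nat), xs.count t = 1 ∧ ys.count t = 1 ∧
    PySem.List.index? xs t = some k ∧ PySem.List.index? ys t = some j ∧
    (k : Int) - (j : Int) ≤ m ∧ z = (t, (k : Int), (j : Int))

-- reg_first lookup of a member of ys is its index
theorem pvRegFirst_getD (ys : List String) (t : String) (j : Nat)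
    (hj : PySem.List.index? ys t = some j) :
    (pvRegFirst ys).getD t 0 = (j : Int) := by
  rw [PySem.Dict.getD_eq_get?_getD]
  unfold pvRegFirst
  rw [pvRegFirst_get? ys t 0 PySem.Dict.empty]
  rw [if_neg (by rw [PySem.Dict.contains_empty]; simp)]
  rw [hj]
  simp

theorem pvMemB (xs ys : List String) (m : Int) (z : String × Int × Int) :
    z ∈ (((PySem.List.enumerate xs 0).filter (fun q =>
        (PySem.Dict.counter xs).getD q.2 0 == (1 : Int) &&
        (PySem.Dict.counter ys).get? q.2 == some (1 : Int) &&
        decide (q.1 - (pvRegFirst ys).getD q.2 0 ≤ m))).map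
        (fun q => (q.2, q.1, (pvRegFirst ys).getD q.2 0)))
    ↔ pvRow xs ys m z := by
  simp only [List.mem_map, List.mem_filter, PySem.List.mem_enumerate_iff]
  constructor
  · rintro ⟨q, ⟨⟨k, hk, rfl⟩, hP⟩, rfl⟩
    simp only [zero_add] at hP ⊢
    set t := xs[k] with hts
    simp only [Bool.and_eq_true, beq_iff_eq] at hP
    obtain ⟨⟨h1, h2⟩, h3⟩ := hP
    rw [PySem.Dict.getD_counter] at h1
    have hcx : xs.count t = 1 := by exact_mod_cast h1
    have hcy : ys.count t = 1 := (pvCounterGet?_one_iff ys t).mp h2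
    have hty : t ∈ ys := List.count_pos_iff.mp (by omega)
    obtain ⟨j, hj⟩ := Option.isSome_iff_exists.mp ((PySem.List.index?_isSome_iff ys t).mpr hty)
    have hgd := pvRegFirst_getD ys t j hj
    refine ⟨t, k, j, hcx, hcy, pvIndex?_of_count_one xs t k hcx hk rfl, hj, ?_, ?_⟩
    · rw [hgd] at h3; exact of_decide_eq_true h3
    · rw [hgd]
  · rintro ⟨t, k, j, hcx, hcy, hkx, hjy, hle, rfl⟩
    obtain ⟨hk, hxk, -⟩ := PySem.List.getElem_of_index?_eq_some hkx
    have hgd := pvRegFirst_getD ys t j hjy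
    refine ⟨((k : Int), xs[k]), ⟨⟨k, hk, by simp⟩, ?_⟩, ?_⟩
    · simp only [Bool.and_eq_true, beq_iff_eq, hxk]
      refine ⟨⟨?_, (pvCounterGet?_one_iff ys t).mpr hcy⟩, ?_⟩
      · rw [PySem.Dict.getD_counter]; exact_mod_cast hcx
      · rw [hgd]; exact decide_eq_true hle
    · simp [hxk, hgd]

theorem pvMemA (xs ys : List String) (m : Int) (z : String × Int × Int) :
    z ∈ ((PySem.Dict.counter xs).items.filterMap (fun p =>
        if p.2 == (1 : Int) && (PySem.Dict.counter ys).get? p.1 == some (1 : Int) &&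
            decide ((((PySem.List.index? xs p.1).getD 0 : Nat) : Int)
              - (((PySem.List.index? ys p.1).getD 0 : Nat) : Int) ≤ m)
        then some (p.1, (((PySem.List.index? xs p.1).getD 0 : Nat) : Int),
                   (((PySem.List.index? ys p.1).getD 0 : Nat) : Int))
        else none))
    ↔ pvRow xs ys m z := by
  rw [PySem.Dict.items_counter, List.filterMap_map]
  simp only [List.mem_filterMap, Function.comp_apply]
  constructor
  · rintro ⟨t, ht, hz⟩
    rw [PySem.Set.mem_ofList] at ht
    split at hz
    case isFalse => exact absurd hz (by simp)
    case isTrue hcond =>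
      simp only [Bool.and_eq_true, beq_iff_eq] at hcond
      obtain ⟨⟨h1, h2⟩, h3⟩ := hcond
      have hcx : xs.count t = 1 := by exact_mod_cast h1
      have hcy : ys.count t = 1 := (pvCounterGet?_one_iff ys t).mp h2
      have htx : t ∈ xs := List.count_pos_iff.mp (by omega)
      have hty : t ∈ ys := List.count_pos_iff.mp (by omega)
      obtain ⟨k, hk⟩ := Option.isSome_iff_exists.mp ((PySem.List.index?_isSome_iff xs t).mpr htx)
      obtain ⟨j, hj⟩ := Option.isSome_iff_exists.mp ((PySem.List.index?_isSome_iff ys t).mpr hty)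
      rw [hk, hj] at h3
      refine ⟨t, k, j, hcx, hcy, hk, hj, by simpa using of_decide_eq_true h3, ?_⟩
      rw [hk, hj] at hz
      simpa using hz.symm
  · rintro ⟨t, k, j, hcx, hcy, hkx, hjy, hle, rfl⟩
    refine ⟨t, (PySem.Set.mem_ofList xs t).mpr (List.count_pos_iff.mp (by omega)), ?_⟩
    rw [if_pos ?_]
    · rw [hkx, hjy]
      simp
    · simp only [Bool.and_eq_true, beq_iff_eq]
      refine ⟨⟨by exact_mod_cast hcx, (pvCounterGet?_one_iff ys t).mpr hcy⟩, ?_⟩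
      rw [hkx, hjy]; simpa using decide_eq_true hle

theorem pvMain (xs ys : List String) (m : Int) :
    PySem.List.sorted
      ((PySem.Dict.counter xs).items.filterMap (fun p =>
        if p.2 == (1 : Int) && (PySem.Dict.counter ys).get? p.1 == some (1 : Int) &&
            decide ((((PySem.List.index? xs p.1).getD 0 : Nat) : Int)
              - (((PySem.List.index? ys p.1).getD 0 : Nat) : Int) ≤ m)
        then some (p.1, (((PySem.List.index? xs p.1).getD 0 : Nat) : Int),
                   (((PySem.List.index? ys p.1).getD 0 : Nat) : Int))
        else none))
      (fun x => x.2.1) false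
    = (PySem.List.enumerate xs).foldl
        (fun out p =>
          if (PySem.Dict.counter xs).getD p.2 0 == (1 : Int) &&
              (PySem.Dict.counter ys).get? p.2 == some (1 : Int) &&
              decide (p.1 - (pvRegFirst ys).getD p.2 0 ≤ m)
          then out ++ [(p.2, p.1, (pvRegFirst ys).getD p.2 0)]
          else out) [] := by
  have hfold := PySem.List.foldl_append_if
        (fun q : Int × String => (PySem.Dict.counter xs).getD q.2 0 == (1 : Int) &&
          (PySem.Dict.counter ys).get? q.2 == some (1 : Int) &&
          decide (q.1 - (pvRegFirst ys).getD q.2 0 ≤ m))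
        (fun q : Int × String => (q.2, q.1, (pvRegFirst ys).getD q.2 0))
        (PySem.List.enumerate xs) []
  simp only [List.nil_append] at hfold
  rw [show (List.foldl
      (fun out p =>
        if (PySem.Dict.counter xs).getD p.2 0 == (1 : Int) &&
            (PySem.Dict.counter ys).get? p.2 == some (1 : Int) &&
            decide (p.1 - (pvRegFirst ys).getD p.2 0 ≤ m)
        then out ++ [(p.2, p.1, (pvRegFirst ys).getD p.2 0)]
        else out) [] (PySem.List.enumerate xs)) = _ from hfold]
  have hPB : List.Pairwise (fun a b : String × Int × Int => a.2.1 < b.2.1)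
      (List.map (fun q : Int × String => (q.2, q.1, (pvRegFirst ys).getD q.2 0))
        (List.filter
          (fun q : Int × String =>
            (PySem.Dict.counter xs).getD q.2 0 == (1 : Int) &&
            (PySem.Dict.counter ys).get? q.2 == some (1 : Int) &&
            decide (q.1 - (pvRegFirst ys).getD q.2 0 ≤ m))
          (PySem.List.enumerate xs))) := by
    rw [List.pairwise_map]
    exact (PySem.List.pairwise_lt_enumerate xs 0).filter _
  apply PySem.List.sorted_eq_of_perm_of_pairwise_lt _ _ _ ?_ hPB
  have hnodupB := hPB.imp
    (fun {a b : String × Int × Int} (h : a.2.1 < b.2.1) (heq : a = b) => by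
      rw [heq] at h; exact lt_irrefl _ h)
  have hnodupA : ((PySem.Dict.counter xs).items.filterMap (fun p =>
      if p.2 == (1 : Int) && (PySem.Dict.counter ys).get? p.1 == some (1 : Int) &&
          decide ((((PySem.List.index? xs p.1).getD 0 : Nat) : Int)
            - (((PySem.List.index? ys p.1).getD 0 : Nat) : Int) ≤ m)
      then some (p.1, (((PySem.List.index? xs p.1).getD 0 : Nat) : Int),
                 (((PySem.List.index? ys p.1).getD 0 : Nat) : Int))
      else none)).Nodup := by
    rw [PySem.Dict.items_counter, List.filterMap_map]
    refine List.pairwise_filterMap.mpr ?_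
    refine (PySem.Set.nodup_ofList xs).imp ?_
    intro a b hab z hz z' hz'
    simp only [Function.comp_apply] at hz hz'
    have h1 : z.1 = a := by
      split at hz
      · exact (Option.some_inj.mp hz).symm ▸ rfl
      · exact absurd hz (by simp)
    have h2 : z'.1 = b := by
      split at hz'
      · exact (Option.some_inj.mp hz').symm ▸ rfl
      · exact absurd hz' (by simp)
    intro he; exact hab (h1 ▸ h2 ▸ he ▸ rfl)
  refine (List.perm_ext_iff_of_nodup hnodupB hnodupA).mpr ?_
  intro z
  rw [pvMemB xs ys m z, pvMemA xs ys m z]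

-- ===== VERDICT (by name: the statement is the Claim_ definition above) =====
theorem common_hapaxes_normalized_spec : Claim_equal_common_hapaxes_normalized := by
  intro raw reg m _
  unfold Spec_common_hapaxes_normalized common_hapaxes_normalized common_hapaxes_normalized_alt
  exact pvMain (raw.map pvNormalize) (reg.map pvNormalize) m
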